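-- pv_equiv track=rewrite | github.com/pothinenisaimadhu/GenAi-TestScriptGeneration-main | mcp-toolbox/mcp-toolbox/orchestrator/agents.py | _parse_structured_format
-- ===== SOURCE A (Python) =====
-- from typing import List, Dict, Any, Optional
--
-- def _parse_structured_format(lines: List[str]) -> List[Dict]:
--     requirements = []
--     current_req = ""
--
--     for line in lines:
--         if any(line.startswith(prefix) for prefix in ["REQ-", "R-"]) or \
--            (line and line[0].isdigit() and "." in line[:5]):
--             if current_req:
--                 requirements.append({"Requirement": current_req.strip()})
--             current_req = line
--         else:
--             current_req += " " + line
--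
--     if current_req:
--         requirements.append({"Requirement": current_req.strip()})
--
--     return requirements
-- ===== SOURCE B (Python) =====
-- from typing import List, Dict
--
--
-- def _is_header(line: str) -> bool:
--     return line.startswith(("REQ-", "R-")) or (
--         bool(line) and line[0].isdigit() and "." in line[:5]
--     )
--
--
-- def _parse_structured_format(lines: List[str]) -> List[Dict]:
--     # Walk the lines back-to-front, collecting each requirement as a run (list)
--     # of its lines (kept in reverse order while building); a header line closes
--     # the run it starts.  The leftover run, if any, is the leading prefix before
--     # the first header.
--     runs = []
--     run = []  # current run's lines, in reverse order
--     for line in reversed(lines):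
--         run.append(line)
--         if _is_header(line):
--             runs.append(run[::-1])
--             run = []
--     segments = ([run[::-1]] if run else []) + runs[::-1]
--     return [{"Requirement": " ".join(seg).strip()} for seg in segments]
-- ===== Notes on version B (the rewrite author's own statement) =====
-- stated objective: alternative
-- what changed: Replaces A's forward loop with an in-loop string accumulator and truthiness-triggered emission by a back-to-front pass that collects each requirement as a list of lines (a header closes the run it starts), then maps every run to its dict via ' '.join(run).strip().
import Mathlib
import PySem

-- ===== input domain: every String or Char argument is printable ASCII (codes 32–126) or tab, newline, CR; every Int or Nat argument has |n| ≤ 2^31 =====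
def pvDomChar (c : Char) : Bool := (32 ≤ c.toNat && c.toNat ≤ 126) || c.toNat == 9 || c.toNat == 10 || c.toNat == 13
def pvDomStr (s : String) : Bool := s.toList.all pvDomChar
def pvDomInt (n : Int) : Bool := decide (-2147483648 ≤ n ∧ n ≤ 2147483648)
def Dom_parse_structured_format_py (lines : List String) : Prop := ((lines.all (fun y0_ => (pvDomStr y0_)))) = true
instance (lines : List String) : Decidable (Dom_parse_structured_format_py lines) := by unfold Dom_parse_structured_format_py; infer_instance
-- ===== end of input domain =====

-- B groups the lines back-to-front into runs (lists of lines) and then maps every run to its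
-- dict, instead of A's forward loop with an in-loop string accumulator; same cost, alternative shape.

-- ===== PORT A =====
-- header test of A: any(line.startswith(p) for p in ["REQ-","R-"]) or (line and line[0].isdigit() and "." in line[:5])
def pvHdrA (line : String) : Bool :=
  (["REQ-", "R-"].any (fun p => PySem.Str.startswith line p)) ||
    (decide (line ≠ "") && ((PySem.Str.pyGet? line 0).elim false PySem.Chars.isdigit) &&
      PySem.Str.isIn "." (PySem.Str.slice line none (some 5)))

-- loop body of A: emit the buffer on a header (if truthy) and restart it, else append " " + line
def pvStepA (st : List (List (String × String)) × String) (line : String) :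
    List (List (String × String)) × String :=
  if pvHdrA line then
    (if st.2 ≠ "" then st.1 ++ [[("Requirement", PySem.Str.strip st.2)]] else st.1, line)
  else (st.1, st.2 ++ (" " ++ line))

-- trailing 'if current_req: requirements.append(...)'
def pvFinishA (st : List (List (String × String)) × String) : List (List (String × String)) :=
  if st.2 ≠ "" then st.1 ++ [[("Requirement", PySem.Str.strip st.2)]] else st.1

def parse_structured_format_py (lines : List String) : List (List (String × String)) :=
  pvFinishA (lines.foldl pvStepA ([], ""))

-- ===== PORT B =====
-- B's header test: line.startswith(("REQ-", "R-")) or (bool(line) and line[0].isdigit() and "." in line[:5])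
def pvIsHeader (line : String) : Bool :=
  PySem.Str.startswith line "REQ-" || PySem.Str.startswith line "R-" ||
    (decide (line ≠ "") && ((PySem.Str.pyGet? line 0).elim false PySem.Chars.isdigit) &&
      PySem.Str.isIn "." (PySem.Str.slice line none (some 5)))

-- B's loop body (over reversed(lines)): run.append(line), kept in reverse order;
-- a header closes the run (appended as run[::-1])
def pvStepB (st : List (List String) × List String) (line : String) :
    List (List String) × List String :=
  let run := st.2 ++ [line]
  if pvIsHeader line then (st.1 ++ [run.reverse], []) else (st.1, run)

-- {"Requirement": " ".join(seg).strip()}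
def pvReqDict (seg : List String) : List (String × String) :=
  [("Requirement", PySem.Str.strip (PySem.Str.join " " seg))]

def parse_structured_format_py_alt (lines : List String) : List (List (String × String)) :=
  let st := lines.reverse.foldl pvStepB ([], [])
  ((if st.2 ≠ [] then [st.2.reverse] else []) ++ st.1.reverse).map pvReqDict

-- ===== PRECONDITION & SPEC =====
def Spec_parse_structured_format_py (lines : List String) (out : List (List (String × String))) : Prop := out = parse_structured_format_py_alt lines
instance (lines : List String) (out : List (List (String × String))) : Decidable (Spec_parse_structured_format_py lines out) := by unfold Spec_parse_structured_format_py; infer_instance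

-- ===== CLAIM (what is proved, stated in full; the proofs are below) =====
def Claim_equal_parse_structured_format_py : Prop := ∀ (lines : List String), Dom_parse_structured_format_py lines → Spec_parse_structured_format_py lines (parse_structured_format_py lines)

-- ===== LEMMAS AND PROOFS =====

-- the two header tests agree
theorem pvHdr_eq (l : String) : pvHdrA l = pvIsHeader l := by
  simp [pvHdrA, pvIsHeader, List.any, Bool.or_assoc]

-- a header line is nonempty
theorem pvIsHeader_ne_empty {l : String} (h : pvIsHeader l = true) : l.toList ≠ [] := by
  intro hnil
  have hl : l = "" := String.toList_eq_nil_iff.mp hnil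
  subst hl
  revert h
  decide

-- requirement segments, recursively from the front: a header starts a new segment
def pvChop (cur : List String) : List String → List (List String)
  | [] => [cur]
  | l :: ls => if pvIsHeader l then cur :: pvChop [l] ls else pvChop (cur ++ [l]) ls

def pvSegs : List String → List (List String)
  | [] => []
  | l :: ls => pvChop [l] ls

-- " ".join over a snoc
theorem pvJoin_append (sp : List Char) (xs : List (List Char)) (y : List Char) (h : xs ≠ []) :
    PySem.Chars.join sp (xs ++ [y]) = PySem.Chars.join sp xs ++ sp ++ y := by
  induction xs with
  | nil => exact absurd rfl h
  | cons a t ih =>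
    cases t with
    | nil => simp [PySem.Chars.join_cons_cons, PySem.Chars.join_singleton]
    | cons b u =>
      have ih' := ih (by simp)
      simp only [List.cons_append] at ih' ⊢
      rw [PySem.Chars.join_cons_cons, PySem.Chars.join_cons_cons, ih']
      simp [List.append_assoc]

theorem pvStrip_cons_space (t : List Char) :
    PySem.Chars.strip (' ' :: t) = PySem.Chars.strip t := by
  have hsp : PySem.Chars.isspace ' ' = true := by decide
  simp [PySem.Chars.strip, PySem.Chars.lstrip, PySem.Chars.rstrip, hsp]

theorem pvString_eq_of_toList {s t : String} (h : s.toList = t.toList) : s = t :=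
  String.toList_inj.mp h

-- the buffer invariant of A's loop: cur prints (up to strip) as " ".join(seg)
def pvInv (cur : String) (seg : List String) : Prop :=
  cur.toList = (PySem.Str.join " " seg).toList ∨
    cur.toList = ' ' :: (PySem.Str.join " " seg).toList

theorem pvStrip_of_inv {cur : String} {seg : List String} (h : pvInv cur seg) :
    PySem.Str.strip cur = PySem.Str.strip (PySem.Str.join " " seg) := by
  apply pvString_eq_of_toList
  rw [PySem.Str.toList_strip, PySem.Str.toList_strip]
  rcases h with h | h
  · rw [h]
  · rw [h, pvStrip_cons_space]

theorem pvInv_snoc {cur : String} {seg : List String} (hseg : seg ≠ [])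
    (h : pvInv cur seg) (l : String) : pvInv (cur ++ (" " ++ l)) (seg ++ [l]) := by
  have hx : (PySem.Str.join " " (seg ++ [l])).toList =
      (PySem.Str.join " " seg).toList ++ (' ' :: l.toList) := by
    rw [PySem.Str.toList_join, PySem.Str.toList_join, List.map_append, List.map_cons,
      List.map_nil, pvJoin_append _ _ _ (by simpa using hseg)]
    simp
  have ha : (cur ++ (" " ++ l)).toList = cur.toList ++ (' ' :: l.toList) := by
    rw [String.toList_append, String.toList_append]
    simp
  rcases h with h | h
  · exact Or.inl (by rw [ha, hx, h])
  · exact Or.inr (by rw [ha, hx, h]; simp)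

theorem pvJoin_single (l : String) : (PySem.Str.join " " [l]).toList = l.toList := by
  rw [PySem.Str.toList_join]
  simp [PySem.Chars.join_singleton]

-- A's loop emits exactly the chopped segments
theorem pvLoopA_spec (ls : List String) : ∀ (acc : List (List (String × String)))
    (cur : String) (seg : List String), seg ≠ [] → cur.toList ≠ [] → pvInv cur seg →
    pvFinishA (ls.foldl pvStepA (acc, cur)) = acc ++ (pvChop seg ls).map pvReqDict := by
  induction ls with
  | nil =>
    intro acc cur seg hseg hne hinv
    have hcur : cur ≠ "" := by
      intro h; subst h; simp at hne
    simp only [List.foldl_nil, pvFinishA, if_pos hcur, pvChop, List.map_cons, List.map_nil]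
    rw [pvStrip_of_inv hinv]
    simp [pvReqDict]
  | cons l ls ih =>
    intro acc cur seg hseg hne hinv
    have hcur : cur ≠ "" := by
      intro h; subst h; simp at hne
    rw [List.foldl_cons]
    by_cases hh : pvIsHeader l = true
    · have hstep : pvStepA (acc, cur) l =
          (acc ++ [[("Requirement", PySem.Str.strip cur)]], l) := by
        simp [pvStepA, pvHdr_eq, hh, if_pos hcur]
      rw [hstep, ih _ l [l] (by simp) (pvIsHeader_ne_empty hh)
        (Or.inl (pvJoin_single l).symm)]
      rw [pvStrip_of_inv hinv]
      simp [pvChop, hh, pvReqDict]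
    · have hstep : pvStepA (acc, cur) l = (acc, cur ++ (" " ++ l)) := by
        simp [pvStepA, pvHdr_eq, hh]
      rw [hstep, ih _ _ (seg ++ [l]) (by simp)
        (by rw [String.toList_append]; simp [hne])
        (pvInv_snoc hseg hinv l)]
      simp [pvChop, hh]

theorem pvA_segs (lines : List String) :
    parse_structured_format_py lines = (pvSegs lines).map pvReqDict := by
  cases lines with
  | nil => simp [parse_structured_format_py, pvFinishA, pvSegs]
  | cons l ls =>
    rw [parse_structured_format_py, List.foldl_cons]
    by_cases hh : pvIsHeader l = true
    · have hstep : pvStepA ([], "") l = ([], l) := by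
        simp [pvStepA, pvHdr_eq, hh]
      rw [hstep, pvLoopA_spec ls [] l [l] (by simp) (pvIsHeader_ne_empty hh)
        (Or.inl (pvJoin_single l).symm)]
      simp [pvSegs]
    · have hstep : pvStepA ([], "") l = ([], "" ++ (" " ++ l)) := by
        simp [pvStepA, pvHdr_eq, hh]
      have htl : ("" ++ (" " ++ l) : String).toList = ' ' :: l.toList := by
        rw [String.toList_append, String.toList_append]; simp
      rw [hstep, pvLoopA_spec ls [] _ [l] (by simp) (by rw [htl]; simp)
        (Or.inr (by rw [htl, pvJoin_single l]))]
      simp [pvSegs]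

-- B's backwards fold, written as a foldr
def pvFoldB (ls : List String) : List (List String) × List String :=
  ls.foldr (fun l st => pvStepB st l) ([], [])

theorem pvChop_foldB (ls : List String) : ∀ cur : List String,
    pvChop cur ls = (cur ++ (pvFoldB ls).2.reverse) :: (pvFoldB ls).1.reverse := by
  induction ls with
  | nil => intro cur; simp [pvChop, pvFoldB]
  | cons l ls ih =>
    intro cur
    have hf : pvFoldB (l :: ls) = pvStepB (pvFoldB ls) l := rfl
    by_cases hh : pvIsHeader l = true
    · rw [pvChop, if_pos hh, ih [l], hf]
      simp [pvStepB, hh]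
    · rw [pvChop, if_neg hh, ih (cur ++ [l]), hf]
      simp [pvStepB, hh]

theorem pvB_segs (lines : List String) :
    parse_structured_format_py_alt lines = (pvSegs lines).map pvReqDict := by
  rw [parse_structured_format_py_alt]
  rw [List.foldl_reverse]
  cases lines with
  | nil => simp [pvSegs]
  | cons l ls =>
    have hf : (l :: ls).foldr (fun x y => pvStepB y x) ([], []) = pvStepB (pvFoldB ls) l := rfl
    rw [hf]
    have hchop := pvChop_foldB ls [l]
    by_cases hh : pvIsHeader l = true
    · simp only [pvStepB, hh, if_pos]
      simp only [pvSegs, hchop]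
      simp
    · simp only [pvStepB, hh, if_neg, Bool.false_eq_true, not_false_iff]
      simp only [pvSegs, hchop]
      simp

-- ===== VERDICT (by name: the statement is the Claim_ definition above) =====
theorem parse_structured_format_py_spec : Claim_equal_parse_structured_format_py := by
  intro lines _
  unfold Spec_parse_structured_format_py
  rw [pvA_segs, pvB_segs]
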